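-- pv_equiv track=rewrite | github.com/GitMonsters/octotetrahedral-agi | arc-puzzle-catalog/solves/30105508/solver.py | transform
-- ===== SOURCE A (Python) =====
-- def transform(grid):
--     H = len(grid)
--     W = len(grid[0])
--
--     # Find background (most frequent)
--     from collections import Counter
--     flat = [c for row in grid for c in row]
--     bg = Counter(flat).most_common(1)[0][0]
--
--     # Find source cells
--     sources = []
--     color = None
--     for r in range(H):
--         for c in range(W):
--             if grid[r][c] != bg:
--                 sources.append((r, c))
--                 color = grid[r][c]
--
--     if not sources:
--         return [[0]*W for _ in range(H)]
--
--     def bounce(x, L):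
--         if L == 1:
--             return 0
--         p = 2 * (L - 1)
--         x = x % p
--         if x >= L:
--             x = p - x
--         return x
--
--     num_steps = max(H, W) - 1
--
--     out = [[0]*W for _ in range(H)]
--
--     for sr, sc in sources:
--         # Determine direction toward interior
--         if sr == 0:
--             dr = 1
--         elif sr == H - 1:
--             dr = -1
--         else:
--             dr = 1 if sr < H // 2 else -1
--
--         if sc == 0:
--             dc = 1
--         elif sc == W - 1:
--             dc = -1
--         else:
--             dc = 1 if sc < W // 2 else -1
--
--         for t in range(num_steps + 1):
--             r = bounce(sr + dr * t, H)
--             c = bounce(sc + dc * t, W)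
--             out[r][c] = color
--
--     return out
-- ===== SOURCE B (Python) =====
-- def _step(x, v, L):
--     if L == 1:
--         return 0, v
--     nx = x + v
--     if nx < 0 or nx > L - 1:
--         return x - v, -v
--     return nx, v
--
--
-- def transform(grid):
--     H = len(grid)
--     W = len(grid[0])
--
--     # Background = most frequent value (first-seen wins ties, like Counter.most_common)
--     counts = {}
--     for row in grid:
--         for v in row:
--             counts[v] = counts.get(v, 0) + 1
--     bg = max(counts.items(), key=lambda kv: kv[1])[0]
--
--     sources = [(r, c) for r in range(H) for c in range(W) if grid[r][c] != bg]
--     if not sources: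
--         return [[0] * W for _ in range(H)]
--     lr, lc = sources[-1]
--     color = grid[lr][lc]
--
--     num_steps = max(H, W) - 1
--
--     # Incremental billiard walk instead of the closed-form reflection formula;
--     # collect every visited cell in a set, then render the grid in one pass.
--     visited = set()
--     for sr, sc in sources:
--         dr = 1 if sr == 0 else (-1 if sr == H - 1 else (1 if sr < H // 2 else -1))
--         dc = 1 if sc == 0 else (-1 if sc == W - 1 else (1 if sc < W // 2 else -1))
--         r, c, vr, vc = sr, sc, dr, dc
--         visited.add((r, c))
--         for _ in range(num_steps):
--             r, vr = _step(r, vr, H)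
--             c, vc = _step(c, vc, W)
--             visited.add((r, c))
--
--     return [[color if (r, c) in visited else 0 for c in range(W)] for r in range(H)]
-- ===== Notes on version B (the rewrite author's own statement) =====
-- stated objective: alternative
-- what changed: Replaces the closed-form modular reflection formula (bounce) evaluated per step with an incremental billiard walk that flips a velocity at the walls, collects all visited cells in a set, and renders the output grid in one final pass instead of mutating an output grid cell by cell; sources and colour come from a comprehension plus last-element lookup instead of a fold threading a running colour.
import Mathlib
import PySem

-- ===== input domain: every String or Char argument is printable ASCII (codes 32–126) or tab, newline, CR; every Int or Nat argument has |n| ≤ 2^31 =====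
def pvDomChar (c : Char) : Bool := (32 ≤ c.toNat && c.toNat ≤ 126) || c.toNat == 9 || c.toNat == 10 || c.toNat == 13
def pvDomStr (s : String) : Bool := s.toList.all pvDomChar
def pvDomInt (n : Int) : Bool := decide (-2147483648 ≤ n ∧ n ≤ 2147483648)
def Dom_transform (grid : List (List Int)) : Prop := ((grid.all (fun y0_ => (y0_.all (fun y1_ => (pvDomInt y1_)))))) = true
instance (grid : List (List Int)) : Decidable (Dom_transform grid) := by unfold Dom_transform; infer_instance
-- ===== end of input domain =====

-- B replaces A's closed-form reflection formula by an incremental billiard walk that collects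
-- visited cells in a set and renders the output grid in one final pass (objective: alternative).

-- ===== PORT A =====

-- shared by both ports: grid[r][c] for the in-range nonnegative indices both Pythons use
def pvCell (grid : List (List Int)) (r c : Nat) : Int := (grid.getD r []).getD c 0

-- the direction choice both Pythons make verbatim (Python's H//2 on a nonnegative int = Nat division)
def pvDir (s L : Nat) : Int :=
  if s = 0 then 1 else if s = L - 1 then -1 else if s < L / 2 then 1 else -1

def pvBounce (x L : Int) : Int :=
  if L = 1 then 0
  else
    let p := 2 * (L - 1)
    let m := PySem.Int.mod x p
    if m ≥ L then p - m else m

-- out[r][c] = v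
def pvSet2d (g : List (List Int)) (r c : Nat) (v : Int) : List (List Int) :=
  g.modify r (fun row => row.set c v)

-- A's source-collecting double loop, threading the running `color`
def pvSrcFoldA (grid : List (List Int)) (bg : Int) (H W : Nat) :
    List (Nat × Nat) × Option Int :=
  (List.range H).foldl (fun acc r =>
    (List.range W).foldl (fun acc c =>
      if pvCell grid r c ≠ bg then (acc.1 ++ [(r, c)], some (pvCell grid r c)) else acc) acc)
    ([], none)

def transform (grid : List (List Int)) : List (List Int) :=
  let H := grid.length
  let W := grid.headI.length
  let flat := grid.flatMap (fun row => row)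
  -- Counter(flat).most_common(1)[0][0]: first key of maximal count; raises on empty flat (excluded by Pre_)
  match PySem.List.max? (PySem.Dict.counter flat).items (fun kv => kv.2) with
  | none => []
  | some kv =>
    let bg := kv.1
    let sc := pvSrcFoldA grid bg H W
    if sc.1 = [] then List.replicate H (List.replicate W 0)
    else
      let color := sc.2.getD 0
      let numSteps := max H W - 1
      sc.1.foldl (fun out s =>
        let dr := pvDir s.1 H
        let dc := pvDir s.2 W
        (PySem.List.pyRange 0 ((numSteps : Int) + 1)).foldl (fun out t =>
          pvSet2d out (pvBounce ((s.1 : Int) + dr * t) (H : Int)).toNat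
                      (pvBounce ((s.2 : Int) + dc * t) (W : Int)).toNat color) out)
        (List.replicate H (List.replicate W 0))

-- ===== PORT B =====

def pvStep (x v : Int) (L : Nat) : Int × Int :=
  if L = 1 then (0, v)
  else
    let nx := x + v
    if nx < 0 ∨ nx > (L : Int) - 1 then (x - v, -v) else (nx, v)

-- B's per-source billiard walk, accumulating visited cells into the set
def pvWalk (H W numSteps : Nat) (vis : PySem.Set (Int × Int)) (s : Nat × Nat) :
    PySem.Set (Int × Int) :=
  let dr := pvDir s.1 H
  let dc := pvDir s.2 W
  let st := (List.range numSteps).foldl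
      (fun (st : (Int × Int) × (Int × Int) × PySem.Set (Int × Int)) _ =>
        let rv := pvStep st.1.1 st.1.2 H
        let cv := pvStep st.2.1.1 st.2.1.2 W
        (rv, cv, PySem.Set.add st.2.2 (rv.1, cv.1)))
      (((s.1 : Int), dr), ((s.2 : Int), dc), PySem.Set.add vis ((s.1 : Int), (s.2 : Int)))
  st.2.2

-- B's source comprehension
def pvSrcListB (grid : List (List Int)) (bg : Int) (H W : Nat) : List (Nat × Nat) :=
  (List.range H).flatMap (fun r =>
    ((List.range W).filter (fun c => pvCell grid r c ≠ bg)).map (fun c => (r, c)))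

def transform_alt (grid : List (List Int)) : List (List Int) :=
  let H := grid.length
  let W := grid.headI.length
  let counts := grid.foldl (fun d row =>
      row.foldl (fun d v => d.insert v (d.getD v 0 + 1)) d)
      (PySem.Dict.empty : PySem.Dict Int Int)
  -- max(counts.items(), key=count)[0]: raises on an empty dict (excluded by Pre_)
  match PySem.List.max? counts.items (fun kv => kv.2) with
  | none => []
  | some kv =>
    let bg := kv.1
    let sources := pvSrcListB grid bg H W
    if sources = [] then List.replicate H (List.replicate W 0)
    else
      let l := sources.getLastD (0, 0)
      let color := pvCell grid l.1 l.2
      let numSteps := max H W - 1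
      let visited := sources.foldl (pvWalk H W numSteps) PySem.Set.empty
      (List.range H).map (fun (r : Nat) =>
        (List.range W).map (fun (c : Nat) =>
          if PySem.Set.contains visited (((r : Nat) : Int), ((c : Nat) : Int)) then color else 0))

-- ===== PRECONDITION & SPEC =====
-- Pre_ excludes exactly the inputs on which A raises: an all-empty grid (Counter(...).most_common(1)[0]
-- is an IndexError) and a grid with a row shorter than the first row (grid[r][c] is an IndexError).
def Pre_transform (grid : List (List Int)) : Prop :=
  grid.flatten ≠ [] ∧ ∀ row ∈ grid, grid.headI.length ≤ row.length
instance (grid : List (List Int)) : Decidable (Pre_transform grid) := by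
  unfold Pre_transform; infer_instance
def pvWitness_transform : List (List Int) := [[0, 0], [0, 1]]

def Spec_transform (grid : List (List Int)) (out : List (List Int)) : Prop := out = transform_alt grid
instance (grid : List (List Int)) (out : List (List Int)) : Decidable (Spec_transform grid out) := by unfold Spec_transform; infer_instance

-- ===== CLAIM (what is proved, stated in full; the proofs are below) =====
def Claim_equal_transform : Prop := ∀ (grid : List (List Int)), Dom_transform grid → Pre_transform grid → Spec_transform grid (transform grid)

-- ===== LEMMAS AND PROOFS =====

-- B's nested counting loop is Counter(flat)
theorem pv_counts_eq (grid : List (List Int)) :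
    grid.foldl (fun d row => row.foldl (fun d v => d.insert v (d.getD v 0 + 1)) d)
      PySem.Dict.empty
      = PySem.Dict.counter (grid.flatMap (fun row => row)) := by
  rw [← PySem.Dict.foldl_insert_getD_add_one_eq_counter]
  rw [show grid.flatMap (fun row => row) = grid.flatten by simp]
  rw [List.foldl_flatten]

theorem pv_last_elim {α β : Type} (t : α) (l : List α) (z : β) (g : α → β) :
    ((t :: l).getLast?.elim z g) = (l.getLast?.elim (g t) g) := by
  cases l with
  | nil => simp
  | cons a l =>
      rw [List.getLast?_cons_cons]
      cases e : (a :: l).getLast? with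
      | none => simp [List.getLast?_eq_none_iff] at e
      | some b => simp

-- the append-if fold of A's source scan, together with its running last value
theorem pv_foldl_if_last {α : Type} (p : α → Prop) [DecidablePred p] (f : α → Int)
    (ts : List α) (acc : List α × Option Int) :
    ts.foldl (fun acc x => if p x then (acc.1 ++ [x], some (f x)) else acc) acc
      = (acc.1 ++ ts.filter (fun x => decide (p x)),
         ((ts.filter (fun x => decide (p x))).getLast?.elim acc.2 (fun x => some (f x)))) := by
  induction ts generalizing acc with
  | nil => simp
  | cons t ts ih =>
      rw [List.foldl_cons]
      by_cases hp : p t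
      · rw [if_pos hp, ih, List.filter_cons_of_pos (by simpa using hp)]
        simp [pv_last_elim]
      · rw [if_neg hp, ih, List.filter_cons_of_neg (by simpa using hp)]

-- A's source fold = (B's source list, the colour of its last element)
theorem pv_src_eq (grid : List (List Int)) (bg : Int) (H W : Nat) :
    pvSrcFoldA grid bg H W
      = (pvSrcListB grid bg H W,
         (pvSrcListB grid bg H W).getLast?.map (fun p => pvCell grid p.1 p.2)) := by
  unfold pvSrcFoldA pvSrcListB
  have step1 : ∀ (r : Nat) (acc : List (Nat × Nat) × Option Int),
      (List.range W).foldl (fun acc c =>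
        if pvCell grid r c ≠ bg then (acc.1 ++ [(r, c)], some (pvCell grid r c)) else acc) acc
      = ((List.range W).map (fun c => (r, c))).foldl (fun acc q =>
          if pvCell grid q.1 q.2 ≠ bg then (acc.1 ++ [q], some (pvCell grid q.1 q.2)) else acc) acc := by
    intro r acc
    rw [List.foldl_map]
  have step2 :
      (List.range H).foldl (fun acc r =>
        (List.range W).foldl (fun acc c =>
          if pvCell grid r c ≠ bg then (acc.1 ++ [(r, c)], some (pvCell grid r c)) else acc) acc)
        ([], none)
      = ((List.range H).flatMap (fun r => (List.range W).map (fun c => (r, c)))).foldl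
          (fun acc q =>
            if pvCell grid q.1 q.2 ≠ bg then (acc.1 ++ [q], some (pvCell grid q.1 q.2)) else acc)
          ([], none) := by
    rw [List.foldl_flatMap]
    exact List.foldl_ext _ _ _ (fun acc r _ => step1 r acc)
  have key :
      ((List.range H).flatMap (fun r => (List.range W).map (fun c => (r, c)))).foldl
          (fun acc q =>
            if pvCell grid q.1 q.2 ≠ bg then (acc.1 ++ [q], some (pvCell grid q.1 q.2)) else acc)
          (([], none) : List (Nat × Nat) × Option Int)
      = (([] : List (Nat × Nat)) ++ (((List.range H).flatMap (fun r => (List.range W).map (fun c => (r, c)))).filter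
            (fun (q : Nat × Nat) => decide (pvCell grid q.1 q.2 ≠ bg))),
         ((((List.range H).flatMap (fun r => (List.range W).map (fun c => (r, c)))).filter
            (fun (q : Nat × Nat) => decide (pvCell grid q.1 q.2 ≠ bg))).getLast?.elim
            (none : Option Int) (fun (q : Nat × Nat) => some (pvCell grid q.1 q.2)))) :=
    pv_foldl_if_last (fun (q : Nat × Nat) => pvCell grid q.1 q.2 ≠ bg)
      (fun (q : Nat × Nat) => pvCell grid q.1 q.2) _ _
  rw [step2, key]
  simp only [List.nil_append]
  have hfilter : ((List.range H).flatMap (fun r => (List.range W).map (fun c => (r, c)))).filter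
      (fun (q : Nat × Nat) => decide (pvCell grid q.1 q.2 ≠ bg))
      = (List.range H).flatMap (fun r =>
          ((List.range W).filter (fun c => pvCell grid r c ≠ bg)).map (fun c => (r, c))) := by
    rw [List.filter_flatMap]
    congr 1
    funext r
    rw [List.filter_map]
    rfl
  rw [hfilter]
  congr 1
  cases e : ((List.range H).flatMap (fun r =>
      ((List.range W).filter (fun c => pvCell grid r c ≠ bg)).map (fun c => (r, c)))).getLast? <;>
    simp

theorem pv_src_mem (grid : List (List Int)) (bg : Int) (H W : Nat) (p : Nat × Nat)
    (hp : p ∈ pvSrcListB grid bg H W) : p.1 < H ∧ p.2 < W := by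
  simp only [pvSrcListB, List.mem_flatMap, List.mem_map, List.mem_filter, List.mem_range] at hp
  obtain ⟨r, hr, c, ⟨hc, _⟩, rfl⟩ := hp
  exact ⟨hr, hc⟩

theorem pvBounce_eq (x L : Int) : pvBounce x L =
    if L = 1 then 0 else
    (if PySem.Int.mod x (2*(L-1)) ≥ L then 2*(L-1) - PySem.Int.mod x (2*(L-1))
     else PySem.Int.mod x (2*(L-1))) := rfl

theorem pvStep_eq (x v : Int) (L : Nat) : pvStep x v L =
    if L = 1 then ((0:Int), v) else
    if x + v < 0 ∨ x + v > (L:Int) - 1 then (x - v, -v) else (x + v, v) := rfl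

-- bounce stays on the board
theorem pv_bounce_bounds (x : Int) (L : Nat) (hL : 1 ≤ L) :
    0 ≤ pvBounce x (L : Int) ∧ pvBounce x (L : Int) ≤ (L : Int) - 1 := by
  rw [pvBounce_eq]
  have hL1 : (1:Int) ≤ (L:Int) := by exact_mod_cast hL
  by_cases h1 : (L:Int) = 1
  · rw [if_pos h1]; omega
  · rw [if_neg h1]
    have hp : (0:Int) < 2 * ((L:Int) - 1) := by omega
    have h2 := PySem.Int.mod_nonneg x hp
    have h3 := PySem.Int.mod_lt x hp
    split_ifs <;> omega

theorem pv_mod_succ (p x : Int) (hp : 2 ≤ p) :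
    PySem.Int.mod (x + 1) p
      = if PySem.Int.mod x p = p - 1 then 0 else PySem.Int.mod x p + 1 := by
  have hp0 : (0:Int) < p := by omega
  have h0 := PySem.Int.mod_nonneg x hp0
  have h1 := PySem.Int.mod_lt x hp0
  simp only [PySem.Int.mod_eq_emod_of_pos hp0] at h0 h1
  simp only [PySem.Int.mod_eq_emod_of_pos hp0]
  have key : (x + 1) % p = (x % p + 1) % p := by
    conv_lhs => rw [show x + 1 = x % p + 1 + p * (x / p) by rw [Int.emod_def]; ring]
    rw [Int.add_mul_emod_self_left]
  rw [key]
  split_ifs with h2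
  · rw [h2, show p - 1 + 1 = p by ring, Int.emod_self]
  · rw [Int.emod_eq_of_lt (by omega) (by omega)]

-- walk invariant: position is the reflection formula, velocity matches the phase
def pvInv (L x : Int) (st : Int × Int) : Prop :=
  st.1 = pvBounce x L ∧ (st.2 = 1 ∨ st.2 = -1) ∧
    (st.1 = 0 ∨ st.1 = L - 1 ∨ (st.2 = 1 ↔ PySem.Int.mod x (2 * (L - 1)) < L - 1))

theorem pv_step_inv (L : Nat) (hL : 2 ≤ L) (x : Int) (st : Int × Int)
    (h : pvInv (L : Int) x st) : pvInv (L : Int) (x + 1) (pvStep st.1 st.2 L) := by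
  obtain ⟨hb, hv, hd⟩ := h
  have hL1 : ((L:Int)) ≠ 1 := by omega
  have hLn : L ≠ 1 := by omega
  have hp0 : (0:Int) < 2 * ((L:Int) - 1) := by omega
  have h0 := PySem.Int.mod_nonneg x hp0
  have h1 := PySem.Int.mod_lt x hp0
  have hm' := pv_mod_succ (2 * ((L:Int) - 1)) x (by omega)
  rw [pvBounce_eq, if_neg hL1] at hb
  unfold pvInv
  rw [pvStep_eq, if_neg hLn, pvBounce_eq, if_neg hL1, hm']
  clear hm'
  split_ifs at hb ⊢ <;> dsimp only <;> omega

def pvIter (s v0 : Int) (L : Nat) : Nat → Int × Int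
  | 0 => (s, v0)
  | k + 1 => pvStep (pvIter s v0 L k).1 (pvIter s v0 L k).2 L

theorem pv_iter_inv (L : Nat) (hL : 2 ≤ L) (x0 : Int) (st : Int × Int)
    (h : pvInv (L : Int) x0 st) (t : Nat) :
    pvInv (L : Int) (x0 + t) (pvIter st.1 st.2 L t) := by
  induction t with
  | zero => simpa using h
  | succ k ih =>
      rw [pvIter, show (x0 + ((k+1 : Nat) : Int)) = (x0 + k) + 1 by push_cast; ring]
      exact pv_step_inv L hL _ _ ih

-- bounce is even and periodic: equal whenever the two phases sum to a multiple of the period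
theorem pv_bounce_refl (L : Nat) (hL : 2 ≤ L) (x y : Int)
    (h : (2 * ((L : Int) - 1)) ∣ (x + y)) : pvBounce x L = pvBounce y L := by
  have hL1 : ((L:Int)) ≠ 1 := by omega
  have hp0 : (0:Int) < 2 * ((L:Int) - 1) := by omega
  set p : Int := 2 * ((L:Int) - 1) with hp
  rw [pvBounce_eq, pvBounce_eq, if_neg hL1, if_neg hL1, ← hp]
  have h0 := PySem.Int.mod_nonneg x hp0
  have h1 := PySem.Int.mod_lt x hp0
  have h2 := PySem.Int.mod_nonneg y hp0
  have h3 := PySem.Int.mod_lt y hp0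
  simp only [PySem.Int.mod_eq_emod_of_pos hp0] at *
  have hx : p ∣ x - x % p := ⟨x / p, by rw [Int.emod_def]; ring⟩
  have hy : p ∣ y - y % p := ⟨y / p, by rw [Int.emod_def]; ring⟩
  have hdvd : p ∣ (x % p + y % p) := by
    have e : x % p + y % p = (x + y) - (x - x % p) - (y - y % p) := by ring
    rw [e]; exact (h.sub hx).sub hy
  obtain ⟨m, hm⟩ := hdvd
  have h5 : 0 ≤ m := by nlinarith
  have h6 : m < 2 := by nlinarith
  have hsum : x % p + y % p = 0 ∨ x % p + y % p = p := by
    interval_cases m <;> omega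
  split_ifs <;> omega

theorem pv_iter_one (v0 : Int) (t : Nat) : pvIter 0 v0 1 t = (0, v0) := by
  induction t with
  | zero => rfl
  | succ k ih => rw [pvIter, ih]; rfl

-- the walk coordinate is exactly A's reflection formula
theorem pv_iter_bounce (L : Nat) (s : Nat) (hs : s < L) (t : Nat) :
    (pvIter (s : Int) (pvDir s L) L t).1 = pvBounce ((s : Int) + pvDir s L * t) L := by
  by_cases hL1 : L = 1
  · subst hL1
    have hs0 : s = 0 := by omega
    subst hs0
    rw [show ((0:Nat):Int) = 0 by rfl, pv_iter_one]
    simp [pvBounce_eq]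
  · have hL : 2 ≤ L := by omega
    have hL1' : ((L:Int)) ≠ 1 := by exact_mod_cast hL1
    have hp0 : (0:Int) < 2 * ((L:Int) - 1) := by omega
    by_cases hd : pvDir s L = 1
    · -- forward phase x0 = s
      have hnot : s ≠ L - 1 ∨ s = 0 := by
        unfold pvDir at hd
        split_ifs at hd <;> omega
      have hInv : pvInv (L : Int) (s : Int) ((s : Int), pvDir s L) := by
        refine ⟨?_, by rw [hd]; left; rfl, ?_⟩
        · rw [pvBounce_eq, if_neg hL1']
          rw [PySem.Int.mod_eq_emod_of_pos hp0,
              Int.emod_eq_of_lt (by positivity) (by omega)]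
          rw [if_neg (by omega)]
        · rcases hnot with h | h
          · right; right
            rw [hd, PySem.Int.mod_eq_emod_of_pos hp0,
                Int.emod_eq_of_lt (by positivity) (by omega)]
            exact ⟨fun _ => by omega, fun _ => rfl⟩
          · left; simp [h]
      have := pv_iter_inv L hL (s : Int) _ hInv t
      rw [this.1, hd, one_mul]
    · have hd' : pvDir s L = -1 := by
        unfold pvDir at *; split_ifs at * <;> simp_all
      have hs0 : s ≠ 0 := by
        intro h; rw [h] at hd'; unfold pvDir at hd'; simp at hd'
      have hsL : 1 ≤ s ∧ s ≤ L - 1 := by omega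
      set x0 : Int := 2 * ((L:Int) - 1) - (s : Int) with hx0
      have hInv : pvInv (L : Int) x0 ((s : Int), pvDir s L) := by
        have hm : PySem.Int.mod x0 (2 * ((L:Int) - 1)) = x0 := by
          rw [PySem.Int.mod_eq_emod_of_pos hp0,
              Int.emod_eq_of_lt (by omega) (by omega)]
        refine ⟨?_, by rw [hd']; right; rfl, ?_⟩
        · rw [pvBounce_eq, if_neg hL1', hm]
          split_ifs with h <;> push_cast <;> omega
        · by_cases hLast : s = L - 1
          · right; left; push_cast; omega
          · right; right
            rw [hd', hm]
            constructor <;> intro h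
            · exact absurd h (by norm_num)
            · exfalso; push_cast at h; omega
      have hiter := pv_iter_inv L hL x0 _ hInv t
      rw [hiter.1, hd']
      apply pv_bounce_refl L hL
      exact ⟨1, by ring⟩

-- rendering a position list as a grid
def pvRender (H W : Nat) (color : Int) (P : List (Int × Int)) : List (List Int) :=
  (List.range H).map (fun (r : Nat) =>
    (List.range W).map (fun (c : Nat) =>
      if (((r : Nat) : Int), ((c : Nat) : Int)) ∈ P then color else 0))

theorem pv_render_nil (H W : Nat) (color : Int) :
    pvRender H W color [] = List.replicate H (List.replicate W 0) := by
  unfold pvRender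
  simp [List.map_const']

theorem pv_mark_render (H W : Nat) (color : Int) (P : List (Int × Int)) (p : Int × Int)
    (hp : 0 ≤ p.1 ∧ p.1 < H ∧ 0 ≤ p.2 ∧ p.2 < W) :
    pvSet2d (pvRender H W color P) p.1.toNat p.2.toNat color
      = pvRender H W color (P ++ [p]) := by
  obtain ⟨h1, h2, h3, h4⟩ := hp
  unfold pvSet2d pvRender
  apply List.ext_getElem
  · simp
  · intro i hi hi'
    simp only [List.length_map, List.length_range] at hi'
    rw [List.getElem_modify]
    simp only [List.getElem_map, List.getElem_range]
    by_cases hrow : p.1.toNat = i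
    · rw [if_pos hrow]
      have hri : (i : Int) = p.1 := by omega
      apply List.ext_getElem
      · simp
      · intro j hj hj'
        simp only [List.length_map, List.length_range] at hj'
        rw [List.getElem_set]
        simp only [List.getElem_map, List.getElem_range]
        by_cases hcol : p.2.toNat = j
        · rw [if_pos hcol]
          have : ((i : Int), (j : Int)) = p := by
            cases p; simp_all; omega
          rw [if_pos (by simp [this])]
        · rw [if_neg hcol]
          have hne : ((i : Int), (j : Int)) ≠ p := by
            cases p; simp_all; omega
          simp [List.mem_append, hne]
    · rw [if_neg hrow]
      have hne : ∀ j : Int, ((i : Int), j) ≠ p := by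
        intro j; cases p; simp_all; omega
      apply List.map_congr_left
      intro c _
      simp [List.mem_append, hne (c : Int)]

theorem pv_fold_marks (H W : Nat) (color : Int) (ps : List (Int × Int))
    (hps : ∀ p ∈ ps, 0 ≤ p.1 ∧ p.1 < H ∧ 0 ≤ p.2 ∧ p.2 < W) (P : List (Int × Int)) :
    ps.foldl (fun out q => pvSet2d out q.1.toNat q.2.toNat color) (pvRender H W color P)
      = pvRender H W color (P ++ ps) := by
  induction ps generalizing P with
  | nil => simp
  | cons q ps ih =>
      rw [List.foldl_cons, pv_mark_render H W color P q (hps q (by simp)),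
          ih (fun p hp => hps p (by simp [hp]))]
      simp

-- B's per-source position list
def pvPosL (H W n : Nat) (s : Nat × Nat) : List (Int × Int) :=
  (List.range (n + 1)).map (fun t =>
    ((pvIter (s.1 : Int) (pvDir s.1 H) H t).1, (pvIter (s.2 : Int) (pvDir s.2 W) W t).1))

theorem pv_walk_fold (H W : Nat) (rv0 cv0 : Int × Int) (vis0 : PySem.Set (Int × Int))
    (n : Nat) :
    (List.range n).foldl
      (fun (st : (Int × Int) × (Int × Int) × PySem.Set (Int × Int)) _ =>
        let rv := pvStep st.1.1 st.1.2 H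
        let cv := pvStep st.2.1.1 st.2.1.2 W
        (rv, cv, PySem.Set.add st.2.2 (rv.1, cv.1)))
      (rv0, cv0, vis0)
      = (pvIter rv0.1 rv0.2 H n, pvIter cv0.1 cv0.2 W n,
         ((List.range n).map (fun k =>
            ((pvIter rv0.1 rv0.2 H (k+1)).1, (pvIter cv0.1 cv0.2 W (k+1)).1))).foldl
           PySem.Set.add vis0) := by
  induction n with
  | zero => simp [pvIter]
  | succ n ih =>
      rw [List.range_succ, List.foldl_append, ih, List.map_append, List.foldl_append]
      simp only [List.foldl_cons, List.foldl_nil, List.map_cons, List.map_nil]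
      rfl

theorem pv_walk_eq (H W n : Nat) (vis : PySem.Set (Int × Int)) (s : Nat × Nat) :
    pvWalk H W n vis s = (pvPosL H W n s).foldl PySem.Set.add vis := by
  unfold pvWalk pvPosL
  dsimp only
  rw [pv_walk_fold]
  rw [List.range_succ_eq_map, List.map_cons, List.foldl_cons, List.map_map]
  rfl

theorem pv_visited_mem (H W n : Nat) (srcs : List (Nat × Nat)) (q : Int × Int) :
    (q ∈ srcs.foldl (pvWalk H W n) PySem.Set.empty)
      ↔ q ∈ srcs.flatMap (pvPosL H W n) := by
  have gen : ∀ (vis : PySem.Set (Int × Int)),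
      (q ∈ srcs.foldl (pvWalk H W n) vis) ↔ q ∈ vis ∨ q ∈ srcs.flatMap (pvPosL H W n) := by
    induction srcs with
    | nil => intro vis; simp
    | cons s ss ih =>
        intro vis
        rw [List.foldl_cons, pv_walk_eq, ih]
        have : ∀ (l : List (Int × Int)) (v : PySem.Set (Int × Int)),
            q ∈ l.foldl PySem.Set.add v ↔ q ∈ v ∨ q ∈ l := by
          intro l v
          have := PySem.Set.mem_foldl_add (l := l) (f := fun x => x) (s := v) (y := q)
          simpa using this
        rw [this]
        simp [or_assoc]
  rw [gen]
  simp [PySem.Set.empty]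

-- ===== VERDICT (by name: the statement is the Claim_ definition above) =====
theorem transform_spec : Claim_equal_transform := by
  unfold Claim_equal_transform
  intro grid _hdom hpre
  unfold Spec_transform
  obtain ⟨hflat, hrows⟩ := hpre
  unfold transform transform_alt
  dsimp only
  simp only [pv_counts_eq]
  have hflat' : grid.flatMap (fun row => row) ≠ [] := by simpa using hflat
  obtain ⟨x, hx⟩ := List.exists_mem_of_ne_nil _ hflat'
  have hitems : (PySem.Dict.counter (grid.flatMap (fun row => row))).items ≠ [] := by
    rw [PySem.Dict.items_counter]
    intro h
    rw [List.map_eq_nil_iff] at h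
    have hxin : x ∈ PySem.Set.ofList (grid.flatMap (fun row => row)) :=
      (PySem.Set.mem_ofList _ _).2 hx
    rw [h] at hxin
    simp at hxin
  obtain ⟨kv, hkv⟩ : ∃ kv, PySem.List.max?
      (PySem.Dict.counter (grid.flatMap (fun row => row))).items
      (fun kv => kv.2) = some kv := by
    cases h : PySem.List.max?
        (PySem.Dict.counter (grid.flatMap (fun row => row))).items (fun kv => kv.2) with
    | none => exact absurd ((PySem.List.max?_eq_none_iff _ _).1 h) hitems
    | some kv => exact ⟨kv, rfl⟩
  rw [hkv]
  dsimp only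
  rw [pv_src_eq]
  dsimp only
  by_cases hempty : pvSrcListB grid kv.1 grid.length grid.headI.length = []
  · rw [if_pos hempty, if_pos hempty]
  · rw [if_neg hempty, if_neg hempty]
    set srcs := pvSrcListB grid kv.1 grid.length grid.headI.length with hsrcs
    obtain ⟨a, ha⟩ : ∃ a, srcs.getLast? = some a := by
      cases e : srcs.getLast? with
      | none => exact absurd ((List.getLast?_eq_none_iff).1 e) hempty
      | some a => exact ⟨a, rfl⟩
    have hcolorA : (srcs.getLast?.map (fun p => pvCell grid p.1 p.2)).getD 0
        = pvCell grid a.1 a.2 := by rw [ha]; rfl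
    have hlastB : srcs.getLastD (0, 0) = a := by
      rw [List.getLastD_eq_getLast?, ha]; rfl
    rw [hcolorA, hlastB]
    obtain ⟨s0, hs0⟩ := List.exists_mem_of_ne_nil _ hempty
    have hs0b := pv_src_mem grid kv.1 grid.length grid.headI.length s0 hs0
    have hH1 : 1 ≤ grid.length := by omega
    have hW1 : 1 ≤ grid.headI.length := by omega
    set n := max grid.length grid.headI.length - 1 with hn
    set color := pvCell grid a.1 a.2 with hcolor
    have hrange : PySem.List.pyRange 0 ((n : Int) + 1) 1
        = (List.range (n+1)).map (fun (k : Nat) => ((k : Nat) : Int)) := by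
      rw [show ((n:Int)+1) = ((n+1 : Nat):Int) by push_cast; ring]
      exact PySem.List.pyRange_zero_natCast (n+1)
    -- A's nested mark fold as a single fold over the flat position list
    have hA : srcs.foldl (fun out s =>
        (PySem.List.pyRange 0 ((n : Int) + 1)).foldl (fun out t =>
          pvSet2d out (pvBounce ((s.1 : Int) + pvDir s.1 grid.length * t) (grid.length : Int)).toNat
            (pvBounce ((s.2 : Int) + pvDir s.2 grid.headI.length * t) (grid.headI.length : Int)).toNat
            color) out)
        (List.replicate grid.length (List.replicate grid.headI.length 0))
      = (srcs.flatMap (fun s => (List.range (n+1)).map (fun (t : Nat) =>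
          (pvBounce ((s.1 : Int) + pvDir s.1 grid.length * (t : Int)) (grid.length : Int),
           pvBounce ((s.2 : Int) + pvDir s.2 grid.headI.length * (t : Int)) (grid.headI.length : Int))))).foldl
          (fun out q => pvSet2d out q.1.toNat q.2.toNat color)
          (List.replicate grid.length (List.replicate grid.headI.length 0)) := by
      rw [List.foldl_flatMap]
      apply List.foldl_ext
      intro out s _
      rw [hrange, List.foldl_map, List.foldl_map]
    rw [hA]
    have hbounds : ∀ p ∈ (srcs.flatMap (fun s => (List.range (n+1)).map (fun (t : Nat) =>
          (pvBounce ((s.1 : Int) + pvDir s.1 grid.length * (t : Int)) (grid.length : Int),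
           pvBounce ((s.2 : Int) + pvDir s.2 grid.headI.length * (t : Int)) (grid.headI.length : Int))))),
        0 ≤ p.1 ∧ p.1 < grid.length ∧ 0 ≤ p.2 ∧ p.2 < grid.headI.length := by
      intro p hp
      simp only [List.mem_flatMap, List.mem_map] at hp
      obtain ⟨s, _, t, _, rfl⟩ := hp
      have b1 := pv_bounce_bounds ((s.1 : Int) + pvDir s.1 grid.length * (t : Int)) grid.length hH1
      have b2 := pv_bounce_bounds ((s.2 : Int) + pvDir s.2 grid.headI.length * (t : Int)) grid.headI.length hW1
      exact ⟨b1.1, by omega, b2.1, by omega⟩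
    rw [← pv_render_nil grid.length grid.headI.length color, pv_fold_marks _ _ _ _ hbounds,
        List.nil_append]
    -- B's visited set holds exactly the same positions
    have hPos : srcs.flatMap (pvPosL grid.length grid.headI.length n)
        = srcs.flatMap (fun s => (List.range (n+1)).map (fun (t : Nat) =>
          (pvBounce ((s.1 : Int) + pvDir s.1 grid.length * (t : Int)) (grid.length : Int),
           pvBounce ((s.2 : Int) + pvDir s.2 grid.headI.length * (t : Int)) (grid.headI.length : Int)))) := by
      apply List.flatMap_congr
      intro s hs
      have hsb := pv_src_mem grid kv.1 grid.length grid.headI.length s hs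
      unfold pvPosL
      apply List.map_congr_left
      intro t _
      rw [pv_iter_bounce grid.length s.1 hsb.1 t, pv_iter_bounce grid.headI.length s.2 hsb.2 t]
    have hmem : ∀ q : Int × Int,
        (PySem.Set.contains (srcs.foldl (pvWalk grid.length grid.headI.length n) PySem.Set.empty) q = true)
        = (q ∈ srcs.flatMap (fun s => (List.range (n+1)).map (fun (t : Nat) =>
          (pvBounce ((s.1 : Int) + pvDir s.1 grid.length * (t : Int)) (grid.length : Int),
           pvBounce ((s.2 : Int) + pvDir s.2 grid.headI.length * (t : Int)) (grid.headI.length : Int)))))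
        := by
      intro q
      apply propext
      refine (PySem.Set.contains_iff _ _).trans ?_
      refine (pv_visited_mem grid.length grid.headI.length n srcs q).trans ?_
      rw [hPos]
    unfold pvRender
    simp only [hmem]
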